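-- pv_equiv track=rewrite | github.com/jayzane/leetcodePy | sort/1370_sort_string.py | sortString3
-- ===== SOURCE A (Python) =====
-- def sortString3(s: str) -> str:
--     def sort_func3(data, asc):
--         minv = min(data)
--         maxv = max(data)
--         tmp = [0 for _ in range(maxv - minv + 1)]
--         res = [0 for _ in range(len(data))]
--         if asc:
--             index_f = lambda x: x - minv
--         else:
--             index_f = lambda x: maxv - x
--         for i in data:
--             tmp[index_f(i)] += 1
--         for i in range(1, len(tmp)):
--             tmp[i] += tmp[i - 1]
--         for i in data:
--             res[tmp[index_f(i)] - 1] = i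
--             tmp[index_f(i)] -= 1
--         return res
--
--     def sort(arr):
--         arr = sort_func3(arr, asc=False)
--         res = []
--         while arr:
--             last_val = None
--             tmp = []
--             while arr:
--                 a = arr.pop()
--                 if last_val != a:
--                     res.append(a)
--                     last_val = a
--                 else:
--                     tmp.append(a)
--             arr = tmp
--         return res
--
--     array = [ord(s1) for s1 in s]
--     result = sort(array)
--     return ''.join(map(lambda x: chr(x), result))
-- ===== SOURCE B (Python) =====
-- def sortString3(s: str) -> str:
--     # Count each character once, then emit round by round: round r outputs the
--     # distinct characters still having more than r copies, ascending on even
--     # rounds and descending on odd rounds.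
--     if not s:
--         return ""
--     counts = {}
--     for ch in s:
--         counts[ch] = counts.get(ch, 0) + 1
--     keys = sorted(counts)
--     m = max(counts.values())
--     out = []
--     for r in range(m):
--         order = keys if r % 2 == 0 else reversed(keys)
--         out.extend(ch for ch in order if counts[ch] > r)
--     return ''.join(out)
-- ===== Notes on version B (the rewrite author's own statement) =====
-- stated objective: faster
-- what changed: Replaces A's hand-written counting sort plus repeated pop-and-dedup passes over the remaining multiset by a single frequency count and direct per-round emission: round r outputs the sorted distinct characters whose count exceeds r, ascending on even rounds, descending on odd rounds.
import Mathlib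
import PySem

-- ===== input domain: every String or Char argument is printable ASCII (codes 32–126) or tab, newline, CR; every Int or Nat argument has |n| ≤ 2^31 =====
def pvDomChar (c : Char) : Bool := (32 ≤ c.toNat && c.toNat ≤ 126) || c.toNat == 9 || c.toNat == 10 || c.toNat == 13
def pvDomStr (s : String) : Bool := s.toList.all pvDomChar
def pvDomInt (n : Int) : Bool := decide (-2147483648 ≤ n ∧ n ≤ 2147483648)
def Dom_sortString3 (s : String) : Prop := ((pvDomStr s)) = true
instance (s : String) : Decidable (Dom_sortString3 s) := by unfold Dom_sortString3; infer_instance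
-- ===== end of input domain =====

-- B replaces A's per-round counting sort + pop/dedup passes by one frequency count and
-- direct per-round emission (objective: faster; return-value equivalence on nonempty strings).

-- ===== PORT A =====
-- sort_func3: hand-written counting sort (all indices are provably in range on every
-- nonempty data list, so pySetD/pyGetD are exact here).
def sortFunc3A (data : List Int) (asc : Bool) : List Int :=
  let minv := (PySem.List.min? data (fun x => x)).getD 0   -- min(data); raises only on [] (excluded by Pre_)
  let maxv := (PySem.List.max? data (fun x => x)).getD 0
  let tmp0 := List.replicate (maxv - minv + 1).toNat (0 : Int)
  let res0 := List.replicate data.length (0 : Int)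
  let indexF := fun (x : Int) => if asc then x - minv else maxv - x
  let tmp1 := data.foldl (fun t i =>
      PySem.List.pySetD t (indexF i) (PySem.List.pyGetD t (indexF i) 0 + 1)) tmp0
  let tmp2 := (PySem.List.pyRange 1 tmp1.length 1).foldl (fun t i =>
      PySem.List.pySetD t i (PySem.List.pyGetD t i 0 + PySem.List.pyGetD t (i - 1) 0)) tmp1
  let st := data.foldl (fun (st : List Int × List Int) i =>
      let r' := PySem.List.pySetD st.2 (PySem.List.pyGetD st.1 (indexF i) 0 - 1) i
      let t' := PySem.List.pySetD st.1 (indexF i) (PySem.List.pyGetD st.1 (indexF i) 0 - 1)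
      (t', r')) (tmp2, res0)
  st.2

-- inner while loop of sort: 'while arr: a = arr.pop(); …' popping from the END of arr
-- is transcribed as head recursion over arr.reverse; res/tmp are the two append lists.
def innerSortA : List Int → Option Int → List Int → List Int → List Int × List Int
  | [], _, res, tmp => (res, tmp)
  | a :: rest, last, res, tmp =>
    if last ≠ some a then innerSortA rest (some a) (res ++ [a]) tmp
    else innerSortA rest last res (tmp ++ [a])

theorem innerSortA_snd_length : ∀ (l : List Int) (last : Option Int) (res tmp : List Int),
    (innerSortA l last res tmp).2.length ≤ tmp.length + l.length := by
  intro l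
  induction l with
  | nil => intro last res tmp; simp [innerSortA]
  | cons a rest ih =>
    intro last res tmp
    by_cases h : last = some a
    · simp only [innerSortA, h]
      simp only [ne_eq, not_true_eq_false, if_false]
      have := ih (some a) res (tmp ++ [a])
      simp at this ⊢
      omega
    · simp only [innerSortA, if_pos (by simpa using h)]
      have := ih (some a) (res ++ [a]) tmp
      simp at this ⊢
      omega

theorem innerSortA_none_lt (l : List Int) (hl : l ≠ []) (res : List Int) :
    (innerSortA l none res []).2.length < l.length := by
  cases l with
  | nil => exact absurd rfl hl
  | cons a rest =>
    have h : (none : Option Int) ≠ some a := by simp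
    simp only [innerSortA, if_pos h]
    have := innerSortA_snd_length rest (some a) (res ++ [a]) []
    simp at this ⊢
    omega

-- outer while loop of sort
def outerSortA (arr : List Int) (res : List Int) : List Int :=
  if h : arr = [] then res
  else
    let p := innerSortA arr.reverse none res []
    outerSortA p.2 p.1
termination_by arr.length
decreasing_by
  have := innerSortA_none_lt arr.reverse (by simpa using h) res
  simpa using this

def sortA (arr : List Int) : List Int :=
  outerSortA (sortFunc3A arr false) []

def sortString3 (s : String) : String :=
  let array := s.toList.map (fun c => (c.toNat : Int))
  let result := sortA array
  String.mk (result.map (fun x => Char.ofNat x.toNat))   -- chr: exact, all codes are char codes of s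

-- ===== PORT B =====
def sortString3_alt (s : String) : String :=
  if s = "" then "" else
    let counts := s.toList.foldl (fun d ch => d.modify ch 0 (· + 1)) PySem.Dict.empty
    let keys := PySem.List.sorted counts.keys (fun k => k) false
    let m := (PySem.List.max? counts.values (fun v => v)).getD 0   -- max(): values nonempty here
    let out := (PySem.List.pyRange 0 m 1).foldl (fun out r =>
        out ++ (if PySem.Int.mod r 2 == 0 then keys else keys.reverse).filter
            (fun ch => counts.getD ch 0 > r)) ([] : List Char)
    String.mk out

-- ===== PRECONDITION & SPEC =====

-- ===== PRECONDITION & SPEC =====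
-- Pre_ excludes only the empty string, on which A raises ValueError (min() of an empty sequence).
def Pre_sortString3 (s : String) : Prop := s ≠ ""
instance (s : String) : Decidable (Pre_sortString3 s) := by unfold Pre_sortString3; infer_instance
def pvWitness_sortString3 : String := "ba"

def Spec_sortString3 (s : String) (out : String) : Prop := out = sortString3_alt s
instance (s : String) (out : String) : Decidable (Spec_sortString3 s out) := by unfold Spec_sortString3; infer_instance

-- ===== CLAIM (what is proved, stated in full; the proofs are below) =====
def Claim_equal_sortString3 : Prop := ∀ (s : String), Dom_sortString3 s → Pre_sortString3 s → Spec_sortString3 s (sortString3 s)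

-- ===== LEMMAS AND PROOFS =====

-- ===== rounds machinery =====
def ascListP {α : Type} (K : List α) (n : α → Nat) : List α :=
  K.flatMap (fun k => List.replicate (n k) k)

def emitRounds {α : Type} : Nat → List α → (α → Nat) → Bool → List α
  | 0, _, _, _ => []
  | m+1, K, n, dir =>
    (if dir then K else K.reverse) ++
      emitRounds m (K.filter fun k => decide (2 ≤ n k)) (fun k => n k - 1) (!dir)

theorem innerSortA_replicate (m : Nat) (k : Int) :
    ∀ (l res tmp : List Int),
    innerSortA (List.replicate m k ++ l) (some k) res tmp
      = innerSortA l (some k) res (tmp ++ List.replicate m k) := by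
  induction m with
  | zero => intro l res tmp; simp
  | succ m ih =>
    intro l res tmp
    simp only [List.replicate_succ, List.cons_append, innerSortA, ne_eq, not_true_eq_false,
      if_false, ih]
    rw [List.append_assoc]
    simp


theorem innerSortA_runs : ∀ (K : List Int) (n : Int → Nat) (last : Option Int)
    (res tmp : List Int),
    (∀ k ∈ K, 1 ≤ n k) → K.IsChain (fun a b => a ≠ b) →
    (∀ k, K.head? = some k → last ≠ some k) →
    innerSortA (ascListP K n) last res tmp
      = (res ++ K, tmp ++ ascListP K (fun k => n k - 1)) := by
  intro K
  induction K with
  | nil => intro n last res tmp _ _ _; simp [ascListP, innerSortA]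
  | cons k K ih =>
    intro n last res tmp h1 h2 h3
    have hk : 1 ≤ n k := h1 k (by simp)
    obtain ⟨m, hm⟩ : ∃ m, n k = m + 1 := ⟨n k - 1, by omega⟩
    have hlast : last ≠ some k := h3 k (by simp)
    simp only [ascListP, List.flatMap_cons, hm]
    rw [List.replicate_succ]
    simp only [List.cons_append, innerSortA, if_pos (by simpa using hlast)]
    rw [innerSortA_replicate]
    rw [show (List.flatMap (fun k => List.replicate (n k) k) K) = ascListP K n from rfl,
      ih n (some k) (res ++ [k]) (tmp ++ List.replicate m k)
      (fun x hx => h1 x (by simp [hx])) h2.of_cons ?_]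
    · simp [ascListP, hm]
    · intro x hx
      cases K with
      | nil => simp at hx
      | cons y Y =>
        simp at hx
        subst hx
        rw [List.isChain_cons_cons] at h2
        simpa using fun h => h2.1 h

theorem emitRounds_nil {α : Type} : ∀ (m : Nat) (n : α → Nat) (dir : Bool),
    emitRounds m ([] : List α) n dir = [] := by
  intro m
  induction m with
  | zero => intro n dir; rfl
  | succ m ih => intro n dir; simp [emitRounds, ih]

theorem ascListP_ne_nil {α : Type} (K : List α) (n : α → Nat) (hK : K ≠ [])
    (h1 : ∀ k ∈ K, 1 ≤ n k) : ascListP K n ≠ [] := by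
  cases K with
  | nil => exact absurd rfl hK
  | cons k K =>
    have h1k := h1 k (by simp)
    intro h
    simp only [ascListP, List.flatMap_cons, List.append_eq_nil_iff,
      List.replicate_eq_nil_iff] at h
    omega

theorem reverse_ascListP {α : Type} (K : List α) (n : α → Nat) :
    (ascListP K n).reverse = ascListP K.reverse n := by
  simp [ascListP, List.reverse_flatMap, Function.comp_def]

theorem ascListP_pred (n : Int → Nat) : ∀ (K : List Int),
    ascListP K (fun k => n k - 1)
      = ascListP (K.filter fun k => decide (2 ≤ n k)) (fun k => n k - 1) := by
  intro K
  induction K with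
  | nil => rfl
  | cons k K ih =>
    simp only [ascListP] at ih ⊢
    by_cases h : 2 ≤ n k
    · simp [List.filter_cons, h, ih]
    · have h0 : n k - 1 = 0 := by omega
      simp [List.filter_cons, h, h0, ih]

theorem outerSortA_emit : ∀ (m : Nat) (K : List Int) (n : Int → Nat) (res : List Int)
    (dir : Bool), K.Pairwise (· < ·) → (∀ k ∈ K, 1 ≤ n k ∧ n k ≤ m) →
    outerSortA (if dir then (ascListP K n).reverse else ascListP K n) res
      = res ++ emitRounds m K n dir := by
  intro m
  induction m with
  | zero =>
    intro K n res dir hp hb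
    cases K with
    | nil => cases dir <;> simp [ascListP, outerSortA, emitRounds]
    | cons k K => have := hb k (by simp); omega
  | succ m ih =>
    intro K n res dir hp hb
    cases hK : decide (K = []) with
    | true =>
      simp at hK; subst hK
      cases dir <;> simp [ascListP, outerSortA, emitRounds_nil]
    | false =>
      simp at hK
      have hne : (if dir then (ascListP K n).reverse else ascListP K n) ≠ [] := by
        have := ascListP_ne_nil K n hK (fun k hk => (hb k hk).1)
        cases dir <;> simp [this]
      rw [outerSortA, dif_neg hne]
      have hchain : K.IsChain (fun a b => a ≠ b) :=
        List.Pairwise.isChain (hp.imp (fun hab => ne_of_lt hab))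
      cases dir with
      | true =>
        rw [show (if true = true then (ascListP K n).reverse else ascListP K n)
            = (ascListP K n).reverse from rfl]
        rw [List.reverse_reverse]
        rw [innerSortA_runs K n none res [] (fun k hk => (hb k hk).1) hchain (by simp)]
        simp only [List.nil_append]
        rw [ascListP_pred n K]
        rw [show (ascListP (K.filter fun k => decide (2 ≤ n k)) fun k => n k - 1)
            = (if false = true then (ascListP (K.filter fun k => decide (2 ≤ n k)) fun k => n k - 1).reverse
               else ascListP (K.filter fun k => decide (2 ≤ n k)) fun k => n k - 1) from rfl]
        rw [ih _ _ _ _ (hp.filter _) ?_]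
        · simp [emitRounds]
        · intro k hk
          simp at hk
          have := hb k hk.1
          omega
      | false =>
        rw [show (if false = true then (ascListP K n).reverse else ascListP K n)
            = ascListP K n from rfl]
        rw [reverse_ascListP]
        have hpr : K.reverse.Pairwise (fun a b => b < a) := List.pairwise_reverse.mpr hp
        have hchainr : K.reverse.IsChain (fun a b => a ≠ b) :=
          List.Pairwise.isChain (hpr.imp (fun hab => ne_of_gt hab))
        rw [innerSortA_runs K.reverse n none res [] (fun k hk => (hb k (by simpa using hk)).1)
          hchainr (by simp)]
        simp only [List.nil_append]
        rw [← reverse_ascListP, ascListP_pred n K]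
        rw [show ((ascListP (K.filter fun k => decide (2 ≤ n k)) fun k => n k - 1).reverse)
            = (if true = true then (ascListP (K.filter fun k => decide (2 ≤ n k)) fun k => n k - 1).reverse
               else ascListP (K.filter fun k => decide (2 ≤ n k)) fun k => n k - 1) from rfl]
        rw [ih _ _ _ _ (hp.filter _) ?_]
        · simp [emitRounds]
        · intro k hk
          simp at hk
          have := hb k hk.1
          omega

-- emitRounds as B computes it: round r emits keys with count > r, direction from parity
def flatRounds {α : Type} (m : Nat) (K : List α) (n : α → Nat) (dir : Bool) : List α :=
  (List.range m).flatMap (fun r =>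
    let F := K.filter (fun k => decide (r < n k))
    if (decide (r % 2 = 0)) == dir then F else F.reverse)

theorem emitRounds_eq_flat {α : Type} : ∀ (m : Nat) (K : List α) (n : α → Nat) (dir : Bool),
    (∀ k ∈ K, 1 ≤ n k) →
    emitRounds m K n dir = flatRounds m K n dir := by
  intro m
  induction m with
  | zero => intro K n dir _; rfl
  | succ m ih =>
    intro K n dir h1
    rw [emitRounds, flatRounds, List.range_succ_eq_map, List.flatMap_cons]
    have hF0 : K.filter (fun k => decide (0 < n k)) = K := by
      apply List.filter_eq_self.mpr
      intro k hk
      simpa using h1 k hk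
    have hhead : (let F := K.filter (fun k => decide ((0:Nat) < n k));
        if (decide ((0:Nat) % 2 = 0)) == dir then F else F.reverse)
        = (if dir then K else K.reverse) := by
      simp only [hF0]
      cases dir <;> simp
    rw [hhead]
    congr 1
    rw [ih _ _ (!dir) (by intro k hk; simp at hk; have := h1 k hk.1; omega)]
    rw [flatRounds, List.flatMap_map]
    have hfun : ((fun r =>
        let F := (K.filter fun k => decide (2 ≤ n k)).filter (fun k => decide (r < n k - 1))
        if (decide (r % 2 = 0)) == !dir then F else F.reverse))
        = ((fun r =>
        let F := K.filter (fun k => decide (r < n k))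
        if (decide (r % 2 = 0)) == dir then F else F.reverse) ∘ Nat.succ) := by
      funext r
      have hF : (K.filter fun k => decide (2 ≤ n k)).filter (fun k => decide (r < n k - 1))
          = K.filter (fun k => decide (r + 1 < n k)) := by
        rw [List.filter_filter]
        apply List.filter_congr
        intro k _
        by_cases h2 : 2 ≤ n k <;> by_cases h3 : r < n k - 1 <;>
          simp [h2, h3] <;> omega
      have hpar : decide ((r + 1) % 2 = 0) = !(decide (r % 2 = 0)) := by
        by_cases hr : r % 2 = 0
        · have : (r + 1) % 2 = 1 := by omega
          simp [hr, this]
        · have : (r + 1) % 2 = 0 := by omega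
          simp [hr, this]
      simp only [Function.comp_apply, Nat.succ_eq_add_one, hF, hpar]
      cases dir <;> cases hdr : decide (r % 2 = 0) <;> simp
    rw [hfun]
    rfl

theorem emitRounds_map {α β : Type} (g : α → β) : ∀ (m : Nat) (K : List α)
    (nB : α → Nat) (nA : β → Nat) (dir : Bool),
    (∀ k ∈ K, nA (g k) = nB k) →
    emitRounds m (K.map g) nA dir = (emitRounds m K nB dir).map g := by
  intro m
  induction m with
  | zero => intro K nB nA dir _; rfl
  | succ m ih =>
    intro K nB nA dir h
    rw [emitRounds, emitRounds]
    have hfil : (K.map g).filter (fun k => decide (2 ≤ nA k))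
        = (K.filter fun k => decide (2 ≤ nB k)).map g := by
      rw [List.filter_map]
      congr 1
      apply List.filter_congr
      intro k hk
      simp [h k hk]
    rw [hfil, ih _ _ _ _ (by intro k hk; simp at hk; rw [h k hk.1])]
    cases dir <;> simp [List.map_reverse]
theorem eq_of_pairwise_lt_of_mem_iff {α : Type} [LinearOrder α] :
    ∀ (l1 l2 : List α), l1.Pairwise (· < ·) → l2.Pairwise (· < ·) →
    (∀ x, x ∈ l1 ↔ x ∈ l2) → l1 = l2 := by
  intro l1
  induction l1 with
  | nil =>
    intro l2 _ _ hmem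
    cases l2 with
    | nil => rfl
    | cons b l2 => exact absurd ((hmem b).mpr (by simp)) (by simp)
  | cons a l1 ih =>
    intro l2 h1 h2 hmem
    cases l2 with
    | nil => exact absurd ((hmem a).mp (by simp)) (by simp)
    | cons b l2 =>
      have hab : a = b := by
        rcases List.mem_cons.mp ((hmem a).mp (by simp)) with h | h
        · exact h
        · rcases List.mem_cons.mp ((hmem b).mpr (by simp)) with h' | h'
          · exact h'.symm
          · have hba := (List.pairwise_cons.mp h2).1 a h
            have hab := (List.pairwise_cons.mp h1).1 b h'
            exact absurd (lt_trans hab hba) (lt_irrefl a)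
      subst hab
      congr 1
      apply ih l2 (List.pairwise_cons.mp h1).2 (List.pairwise_cons.mp h2).2
      intro x
      constructor
      · intro hx
        rcases List.mem_cons.mp ((hmem x).mp (by simp [hx])) with h | h
        · subst h; exact absurd hx (by
            intro hmm; exact absurd ((List.pairwise_cons.mp h1).1 x hmm) (lt_irrefl x))
        · exact h
      · intro hx
        rcases List.mem_cons.mp ((hmem x).mpr (by simp [hx])) with h | h
        · subst h; exact absurd hx (by
            intro hmm; exact absurd ((List.pairwise_cons.mp h2).1 x hmm) (lt_irrefl x))
        · exact h

theorem dict_values_eq_map_keys {κ ν : Type} [BEq κ] [LawfulBEq κ] (dflt : ν) :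
    ∀ (l : List (κ × ν)), (l.map Prod.fst).Nodup →
    (PySem.Dict.mk l).values = (PySem.Dict.mk l).keys.map
      (fun k => (PySem.Dict.mk l).getD k dflt) := by
  intro l
  induction l with
  | nil => intro _; rfl
  | cons p rest ih =>
    intro hnd
    obtain ⟨k, v⟩ := p
    simp only [List.map_cons, List.nodup_cons] at hnd
    have ih' := ih hnd.2
    simp only [PySem.Dict.values_mk, PySem.Dict.keys_mk, List.map_cons] at ih' ⊢
    congr 1
    · simp [PySem.Dict.getD, PySem.Dict.get?_mk_cons]
    · rw [ih']
      apply List.map_congr_left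
      intro x hx
      simp only [List.mem_map] at hx
      obtain ⟨q, hq, hqx⟩ := hx
      have hne : ¬ (k == x) = true := by
        simp only [beq_iff_eq]
        intro hkx
        exact hnd.1 (by rw [hkx, ← hqx]; exact List.mem_map_of_mem hq)
      simp [PySem.Dict.getD, PySem.Dict.get?_mk_cons, hne]

theorem B_reduce (s : String) (hs : s.toList ≠ []) :
    sortString3_alt s = String.mk (flatRounds
      ((PySem.List.max? (PySem.Dict.counter s.toList).values (fun v => v)).getD 0).toNat
      (PySem.List.sorted (PySem.Set.ofList s.toList) (fun x => x) false)
      (fun c => s.toList.count c) true) := by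
  have hse : ¬ s = "" := fun h => hs (by simp [h])
  simp only [sortString3_alt, if_neg hse]
  rw [show (s.toList.foldl (fun d ch => d.modify ch 0 (· + 1)) PySem.Dict.empty)
      = PySem.Dict.counter s.toList from (PySem.Dict.counter_eq_foldl s.toList).symm]
  rw [PySem.List.foldl_append_eq_flatMap, List.nil_append]
  congr 1
  rw [PySem.Dict.keys_counter]
  set M : Int := (PySem.List.max? (PySem.Dict.counter s.toList).values (fun v => v)).getD 0 with hM
  rw [PySem.List.pyRange_one, List.flatMap_map, flatRounds, Int.sub_zero]
  apply List.flatMap_congr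
  intro r hr
  have hmod : PySem.Int.mod (0 + (r:Int)) 2 = ((r % 2 : Nat) : Int) := by
    simp [PySem.Int.mod, Int.fmod_eq_emod]
  have hcond : (PySem.Int.mod (0 + (r:Int)) 2 == 0) = (decide (r % 2 = 0)) := by
    rw [hmod]
    by_cases h : r % 2 = 0
    · simp [h]
    · have h1 : r % 2 = 1 := by omega
      simp [h, h1]
  have hp : (fun ch => decide ((PySem.Dict.counter s.toList).getD ch 0 > 0 + (r:Int)))
      = (fun k => decide (r < List.count k s.toList)) := by
    funext ch
    rw [PySem.Dict.getD_counter]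
    exact decide_eq_decide.mpr (by omega)
  rw [hcond, hp]
  by_cases h : r % 2 = 0 <;> simp [h, List.filter_reverse]

-- ===== counting sort (sort_func3 with asc=False) =====
def csP (c : Nat → Int) (j : Nat) : Int := ∑ k ∈ Finset.range j, c k

theorem csP_mono (c : Nat → Int) {i j : Nat} (hij : i ≤ j) (hc : ∀ k < j, 0 ≤ c k) :
    csP c i ≤ csP c j := by
  unfold csP
  have hsub : Finset.range i ⊆ Finset.range j :=
    fun k hk => Finset.mem_range.mpr (lt_of_lt_of_le (Finset.mem_range.mp hk) hij)
  apply Finset.sum_le_sum_of_subset_of_nonneg hsub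
  intro k hk _
  exact hc k (Finset.mem_range.mp hk)

theorem csP_succ (c : Nat → Int) (j : Nat) : csP c (j+1) = csP c j + c j := by
  simp [csP, Finset.sum_range_succ]

theorem csP_nonneg (c : Nat → Int) (j : Nat) (hc : ∀ k < j, 0 ≤ c k) : 0 ≤ csP c j := by
  have := csP_mono c (Nat.zero_le j) hc
  simpa [csP] using this

theorem phase1 (maxv : Int) : ∀ (l : List Int) (t : List Int),
    (∀ x ∈ l, 0 ≤ maxv - x ∧ (maxv - x).toNat < t.length) →
    (l.foldl (fun t i =>
        PySem.List.pySetD t (maxv - i) (PySem.List.pyGetD t (maxv - i) 0 + 1)) t).length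
      = t.length ∧
    ∀ j < t.length, (l.foldl (fun t i =>
        PySem.List.pySetD t (maxv - i) (PySem.List.pyGetD t (maxv - i) 0 + 1)) t).getD j 0
      = t.getD j 0 + (l.countP (fun x => decide (maxv - x = (j:Int))) : Int) := by
  intro l
  induction l with
  | nil => intro t _; simp
  | cons x l ih =>
    intro t hb
    have hx := hb x (by simp)
    simp only [List.foldl_cons]
    rw [PySem.List.pySetD_of_nonneg _ _ hx.1]
    set t' := t.set (maxv - x).toNat (PySem.List.pyGetD t (maxv - x) 0 + 1) with ht'
    have hlen' : t'.length = t.length := by simp [ht']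
    obtain ⟨hl1, hl2⟩ := ih t' (by intro y hy; rw [hlen']; exact hb y (by simp [hy]))
    refine ⟨by rw [hl1, hlen'], ?_⟩
    intro j hj
    rw [hl2 j (by rw [hlen']; exact hj)]
    rw [List.countP_cons]
    have hget' : t'.getD j 0 = t.getD j 0 + if (maxv - x) = (j:Int) then 1 else 0 := by
      rw [ht', List.getD_eq_getElem?_getD, List.getElem?_set]
      by_cases he : (maxv - x).toNat = j
      · have : maxv - x = (j:Int) := by omega
        rw [if_pos he, if_pos (by omega), if_pos this]
        rw [PySem.List.pyGetD_of_nonneg _ _ hx.1, List.getD_eq_getElem?_getD, he]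
        simp [List.getD_eq_getElem?_getD]
      · have : ¬ (maxv - x = (j:Int)) := by omega
        rw [if_neg he, if_neg this, ← List.getD_eq_getElem?_getD]
        simp
    rw [hget']
    by_cases he : maxv - x = (j:Int) <;> simp [he] <;> push_cast <;> ring

theorem phase2 (c : Nat → Int) (Lb : Nat) :
    ∀ (n : Nat), n + 1 ≤ Lb → ∀ (t : List Int), t.length = Lb →
    (∀ j < Lb, t.getD j 0 = c j) →
    ((PySem.List.pyRange 1 ((n:Int)+1) 1).foldl (fun t i =>
        PySem.List.pySetD t i (PySem.List.pyGetD t i 0 + PySem.List.pyGetD t (i - 1) 0)) t).length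
      = Lb ∧
    ∀ j < Lb, ((PySem.List.pyRange 1 ((n:Int)+1) 1).foldl (fun t i =>
        PySem.List.pySetD t i (PySem.List.pyGetD t i 0 + PySem.List.pyGetD t (i - 1) 0)) t).getD j 0
      = if j ≤ n then csP c (j+1) else c j := by
  intro n
  induction n with
  | zero =>
    intro _ t htl ht
    rw [PySem.List.pyRange_one_eq_nil (by omega)]
    refine ⟨htl, ?_⟩
    intro j hj
    simp only [List.foldl_nil]
    by_cases h0 : j ≤ 0
    · have : j = 0 := by omega
      subst this
      rw [if_pos (by omega)]
      have h1 : csP c 1 = c 0 := by simp [csP]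
      rw [h1]
      exact ht 0 hj
    · rw [if_neg h0]
      exact ht j hj
  | succ n ih =>
    intro hn t htl ht
    have hpeel : PySem.List.pyRange 1 ((n:Int)+1+1) 1
        = PySem.List.pyRange 1 ((n:Int)+1) 1 ++ [(n:Int)+1] := by
      exact PySem.List.pyRange_one_succ_right (by omega)
    rw [show ((n+1:Nat):Int) + 1 = (n:Int)+1+1 by push_cast; ring, hpeel, List.foldl_append]
    obtain ⟨hu1, hu2⟩ := ih (by omega) t htl ht
    set u := (PySem.List.pyRange 1 ((n:Int)+1) 1).foldl (fun t i =>
        PySem.List.pySetD t i (PySem.List.pyGetD t i 0 + PySem.List.pyGetD t (i - 1) 0)) t with hu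
    simp only [List.foldl_cons, List.foldl_nil]
    rw [PySem.List.pySetD_of_nonneg _ _ (by omega), PySem.List.pyGetD_of_nonneg _ _ (by omega),
      PySem.List.pyGetD_of_nonneg _ _ (by omega : (0:Int) ≤ (n:Int)+1-1)]
    have hidx1 : ((n:Int)+1).toNat = n+1 := by omega
    have hidx0 : ((n:Int)+1-1).toNat = n := by omega
    rw [hidx1, hidx0]
    constructor
    · simp [hu1]
    · intro j hj
      rw [List.getD_eq_getElem?_getD, List.getElem?_set]
      by_cases he : n+1 = j
      · subst he
        rw [if_pos rfl, if_pos (by omega)]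
        simp only [Option.getD_some]
        rw [hu2 (n+1) hj, hu2 n (by omega), if_neg (by omega), if_pos (by omega), if_pos (by omega)]
        rw [csP_succ c (n+1)]
        ring
      · rw [if_neg he, ← List.getD_eq_getElem?_getD, hu2 j hj]
        by_cases hle : j ≤ n
        · rw [if_pos hle, if_pos (by omega)]
        · rw [if_neg hle, if_neg (by omega)]

def csStep (maxv : Int) (st : List Int × List Int) (i : Int) : List Int × List Int :=
  let r' := PySem.List.pySetD st.2 (PySem.List.pyGetD st.1 (maxv - i) 0 - 1) i
  let t' := PySem.List.pySetD st.1 (maxv - i) (PySem.List.pyGetD st.1 (maxv - i) 0 - 1)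
  (t', r')

theorem phase3 (maxv : Int) (c : Nat → Int) (Lb N : Nat)
    (hc0 : ∀ j < Lb, 0 ≤ c j) (hNP : csP c Lb ≤ (N:Int)) :
    ∀ (l : List Int) (t r : List Int),
    t.length = Lb → r.length = N →
    (∀ x ∈ l, 0 ≤ maxv - x ∧ (maxv - x).toNat < Lb) →
    (∀ j < Lb, (l.countP (fun x => decide (maxv - x = (j:Int))) : Int) ≤ c j) →
    (∀ j < Lb, t.getD j 0 = csP c j + l.countP (fun x => decide (maxv - x = (j:Int)))) →
    (∀ j < Lb, ∀ p : Nat,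
      csP c j + (l.countP (fun x => decide (maxv - x = (j:Int))) : Int) ≤ (p:Int) →
      (p:Int) < csP c j + c j → r.getD p 0 = maxv - (j:Int)) →
    ((l.foldl (csStep maxv) (t, r)).2.length = N) ∧
    ∀ j < Lb, ∀ p : Nat, csP c j ≤ (p:Int) → (p:Int) < csP c j + c j →
      (l.foldl (csStep maxv) (t, r)).2.getD p 0 = maxv - (j:Int) := by
  intro l
  induction l with
  | nil =>
    intro t r htl hrl _ _ _ hr
    refine ⟨hrl, ?_⟩
    intro j hj p hp1 hp2
    simp only [List.foldl_nil]
    exact hr j hj p (by simpa using hp1) hp2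
  | cons x l ih =>
    intro t r htl hrl hb hcnt ht hr
    have hx := hb x (by simp)
    have hval : maxv - x = ((maxv - x).toNat : Int) := by omega
    set j0 := (maxv - x).toNat with hj0def
    have hj0 : j0 < Lb := hx.2
    have hcc : ((x :: l).countP (fun y => decide (maxv - y = (j0:Int))) : Int)
        = (l.countP (fun y => decide (maxv - y = (j0:Int))) : Int) + 1 := by
      rw [List.countP_cons, if_pos (by simpa using hval)]
      push_cast; ring
    have hcnt_ne : ∀ j : Nat, j ≠ j0 →
        (x :: l).countP (fun y => decide (maxv - y = (j:Int)))
          = l.countP (fun y => decide (maxv - y = (j:Int))) := by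
      intro j hne
      rw [List.countP_cons, if_neg (by simp; omega)]
      omega
    have hpos : t.getD j0 0 - 1 = csP c j0 + l.countP (fun y => decide (maxv - y = (j0:Int))) := by
      rw [ht j0 hj0, hcc]; ring
    have hcsP0 : 0 ≤ csP c j0 := csP_nonneg c j0 (fun k hk => hc0 k (by omega))
    have hposnn : 0 ≤ t.getD j0 0 - 1 := by
      rw [hpos]; positivity
    have hposlt : t.getD j0 0 - 1 < csP c j0 + c j0 := by
      have := hcnt j0 hj0
      rw [hpos]
      rw [hcc] at this
      omega
    have hposN : (t.getD j0 0 - 1).toNat < N := by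
      have h1 : csP c j0 + c j0 ≤ csP c Lb := by
        have := csP_mono c (show j0 + 1 ≤ Lb by omega) hc0
        rw [csP_succ] at this
        omega
      omega
    simp only [List.foldl_cons]
    have hgd : PySem.List.pyGetD t (maxv - x) 0 = t.getD j0 0 := by
      rw [PySem.List.pyGetD_of_nonneg _ _ hx.1, ← hj0def]
    have hstep : csStep maxv (t, r) x
        = (t.set j0 (t.getD j0 0 - 1), r.set (t.getD j0 0 - 1).toNat x) := by
      rw [csStep]
      simp only
      rw [hgd, PySem.List.pySetD_of_nonneg _ _ hposnn, PySem.List.pySetD_of_nonneg _ _ hx.1,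
        ← hj0def]
    rw [hstep]
    -- apply the induction hypothesis to the updated state
    set pN := (t.getD j0 0 - 1).toNat with hpN
    have hpNval : (pN : Int) = t.getD j0 0 - 1 := by omega
    apply ih
    · simp [htl]
    · simp [hrl]
    · intro y hy; exact hb y (by simp [hy])
    · intro j hj
      by_cases he : j = j0
      · rw [he]
        have := hcnt j0 hj0
        rw [hcc] at this
        omega
      · rw [← hcnt_ne j he]
        exact hcnt j hj
    · intro j hj
      rw [List.getD_eq_getElem?_getD, List.getElem?_set]
      by_cases he : j0 = j
      · subst he
        rw [if_pos rfl, if_pos (by omega)]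
        simp only [Option.getD_some]
        rw [hpos]
      · rw [if_neg he, ← List.getD_eq_getElem?_getD, ht j hj, hcnt_ne j (fun hh => he hh.symm)]
    · intro j hj p hp1 hp2
      rw [List.getD_eq_getElem?_getD, List.getElem?_set]
      by_cases hpe : pN = p
      · subst hpe
        rw [if_pos rfl, if_pos (by omega)]
        simp only [Option.getD_some]
        by_cases he : j = j0
        · rw [he]; omega
        · exfalso
          rcases Nat.lt_or_ge j j0 with hlt | hge
          · have : csP c (j+1) ≤ csP c j0 := csP_mono c (by omega) (fun k hk => hc0 k (by omega))
            rw [csP_succ] at this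
            omega
          · have hj0j : j0 + 1 ≤ j := by omega
            have : csP c (j0+1) ≤ csP c j := csP_mono c hj0j (fun k hk => hc0 k (by omega))
            rw [csP_succ] at this
            omega
      · rw [if_neg hpe, ← List.getD_eq_getElem?_getD]
        by_cases he : j = j0
        · apply hr j hj p ?_ hp2
          rw [he] at hp1 ⊢
          rw [hcc]
          have hpne : (p : Int) ≠ (pN : Int) := fun hh => hpe (by omega)
          omega
        · apply hr j hj p ?_ hp2
          rw [hcnt_ne j he]
          exact hp1

theorem canon_of_intervals (val : Nat → Int) (c : Nat → Int) :
    ∀ (Lb : Nat) (r : List Int), (∀ j < Lb, 0 ≤ c j) → ((r.length : Int) = csP c Lb) →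
    (∀ j < Lb, ∀ p : Nat, csP c j ≤ (p:Int) → (p:Int) < csP c j + c j → r.getD p 0 = val j) →
    r = (List.range Lb).flatMap (fun j => List.replicate (c j).toNat (val j)) := by
  intro Lb
  induction Lb with
  | zero =>
    intro r _ hlen _
    simp [csP] at hlen
    simpa using hlen
  | succ Lb ih =>
    intro r hc0 hlen hr
    have hc0' : ∀ j < Lb, 0 ≤ c j := fun j hj => hc0 j (by omega)
    have hcL : 0 ≤ c Lb := hc0 Lb (by omega)
    have hM0 : 0 ≤ csP c Lb := csP_nonneg c Lb hc0'
    have hlen' : (r.length : Int) = csP c Lb + c Lb := by rw [hlen, csP_succ]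
    set M := (csP c Lb).toNat with hMdef
    have hMle : M ≤ r.length := by omega
    have htake : r.take M = (List.range Lb).flatMap (fun j => List.replicate (c j).toNat (val j)) := by
      apply ih (r.take M) hc0'
      · simp only [List.length_take]
        omega
      · intro j hj p hp1 hp2
        have hpM : p < M := by
          have h1 : csP c j + c j ≤ csP c Lb := by
            have := csP_mono c (show j + 1 ≤ Lb by omega) hc0'
            rw [csP_succ] at this
            omega
          omega
        rw [List.getD_eq_getElem?_getD, List.getElem?_take, if_pos hpM,
          ← List.getD_eq_getElem?_getD]
        exact hr j (by omega) p hp1 hp2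
    have hdrop : r.drop M = List.replicate (c Lb).toNat (val Lb) := by
      rw [List.eq_replicate_iff]
      constructor
      · simp; omega
      · intro b hb
        rw [List.mem_iff_getElem] at hb
        obtain ⟨i, hi, hbi⟩ := hb
        have hi' : M + i < r.length := by
          simp at hi
          omega
        have : r.getD (M + i) 0 = val Lb := by
          apply hr Lb (by omega) (M + i) (by push_cast; omega)
          · simp at hi
            push_cast
            omega
        rw [List.getD_eq_getElem?_getD] at this
        rw [← hbi]
        have hgg : (r.drop M)[i] = r[M + i]'hi' := by
          simp [List.getElem_drop]
        rw [hgg]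
        have := this
        rwa [List.getElem?_eq_getElem hi', Option.getD_some] at this
    rw [List.range_succ, List.flatMap_append]
    simp only [List.flatMap_cons, List.flatMap_nil, List.append_nil]
    rw [← htake, ← hdrop, List.take_append_drop]

theorem total_count (maxv : Int) (Lb : Nat) :
    ∀ (l : List Int), (∀ x ∈ l, 0 ≤ maxv - x ∧ (maxv - x).toNat < Lb) →
    (l.length : Int) = csP (fun j => (l.countP (fun x => decide (maxv - x = (j:Int))) : Int)) Lb := by
  intro l
  induction l with
  | nil => simp [csP]
  | cons x l ih =>
    intro hb
    have hx := hb x (by simp)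
    have ihe := ih (fun y hy => hb y (by simp [hy]))
    unfold csP at ihe ⊢
    have hsplit : ∀ j : Nat, ((x :: l).countP (fun y => decide (maxv - y = (j:Int))) : Int)
        = (l.countP (fun y => decide (maxv - y = (j:Int))) : Int)
          + (if maxv - x = (j:Int) then 1 else 0) := by
      intro j
      rw [List.countP_cons]
      by_cases h : maxv - x = (j:Int) <;> simp [h]
    simp only [hsplit]
    rw [Finset.sum_add_distrib, ← ihe]
    have hone : (∑ j ∈ Finset.range Lb, if maxv - x = (j:Int) then (1:Int) else 0) = 1 := by
      rw [Finset.sum_eq_single (maxv - x).toNat]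
      · rw [if_pos (by omega)]
      · intro b _ hbne
        rw [if_neg (by omega)]
      · intro habs
        exact absurd (Finset.mem_range.mpr hx.2) habs
    rw [hone]
    simp only [List.length_cons]
    push_cast
    ring

theorem sortFunc3A_desc (data : List Int) (minv maxv : Int)
    (hmin : PySem.List.min? data (fun x => x) = some minv)
    (hmax : PySem.List.max? data (fun x => x) = some maxv) :
    sortFunc3A data false
      = (List.range (maxv - minv + 1).toNat).flatMap
          (fun (j : Nat) => List.replicate (data.countP (fun x => decide (maxv - x = (j:Int)))) (maxv - (j:Int))) := by
  have hlo : ∀ x ∈ data, minv ≤ x := by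
    intro x hx
    simpa using PySem.List.min?_isMin hmin x hx
  have hhi : ∀ x ∈ data, x ≤ maxv := by
    intro x hx
    simpa using PySem.List.max?_isMax hmax x hx
  have hmm : minv ≤ maxv := hlo maxv (PySem.List.max?_mem hmax)
  set Lb := (maxv - minv + 1).toNat with hLb
  have hLb1 : 1 ≤ Lb := by omega
  have hLbI : (Lb : Int) = maxv - minv + 1 := by omega
  set c : Nat → Int := fun j => (data.countP (fun x => decide (maxv - x = (j:Int))) : Int) with hc
  have hidx : ∀ x ∈ data, 0 ≤ maxv - x ∧ (maxv - x).toNat < Lb := by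
    intro x hx
    have := hlo x hx
    have := hhi x hx
    omega
  have hc0 : ∀ j < Lb, 0 ≤ c j := by
    intro j _
    simp [hc]
  have htot : (data.length : Int) = csP c Lb := total_count maxv Lb data hidx
  rw [sortFunc3A, hmin, hmax]
  simp only [Option.getD_some, Bool.false_eq_true, if_false]
  -- phase 1
  obtain ⟨h1len, h1val⟩ := phase1 maxv data (List.replicate Lb (0:Int))
    (by intro x hx; simpa using hidx x hx)
  set tmp1 := data.foldl (fun t i =>
      PySem.List.pySetD t (maxv - i) (PySem.List.pyGetD t (maxv - i) 0 + 1))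
      (List.replicate Lb (0:Int)) with htmp1
  have h1len' : tmp1.length = Lb := by simpa using h1len
  have h1val' : ∀ j < Lb, tmp1.getD j 0 = c j := by
    intro j hj
    rw [htmp1, h1val j (by simpa using hj)]
    rw [List.getD_replicate _ hj]
    simp [hc]
  -- phase 2
  obtain ⟨h2len, h2val⟩ := phase2 c Lb (Lb - 1) (by omega) tmp1 h1len' h1val'
  have hcast : ((Lb - 1 : Nat) : Int) + 1 = (tmp1.length : Int) := by
    rw [h1len']
    omega
  set tmp2 := (PySem.List.pyRange 1 ((tmp1.length : Int)) 1).foldl (fun t i =>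
      PySem.List.pySetD t i (PySem.List.pyGetD t i 0 + PySem.List.pyGetD t (i - 1) 0)) tmp1 with htmp2
  rw [← hcast] at htmp2
  have h2len' : tmp2.length = Lb := by rw [htmp2]; exact h2len
  have h2val' : ∀ j < Lb, tmp2.getD j 0 = csP c j + c j := by
    intro j hj
    rw [htmp2, h2val j hj, if_pos (by omega), csP_succ]
  -- phase 3
  obtain ⟨h3len, h3val⟩ := phase3 maxv c Lb data.length hc0 (by omega) data tmp2
    (List.replicate data.length (0:Int)) h2len' (by simp) hidx
    (by intro j hj; simp [hc])
    (by intro j hj; rw [h2val' j hj])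
    (by intro j hj p hp1 hp2; simp [hc] at hp1 hp2; omega)
  -- assemble
  have := canon_of_intervals (fun j => maxv - (j:Int)) c Lb _
    hc0 (by rw [h3len]; exact htot) h3val
  rw [show (fun (st : List Int × List Int) i =>
      let r' := PySem.List.pySetD st.2 (PySem.List.pyGetD st.1 (maxv - i) 0 - 1) i
      let t' := PySem.List.pySetD st.1 (maxv - i) (PySem.List.pyGetD st.1 (maxv - i) 0 - 1)
      (t', r')) = csStep maxv from rfl]
  rw [this]
  apply List.flatMap_congr
  intro j _
  simp only [hc, Int.toNat_natCast]

theorem ord_inj : Function.Injective (fun ch : Char => (ch.toNat : Int)) := by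
  intro a b h
  simp only [Int.natCast_inj] at h
  have := congrArg Char.ofNat h
  rwa [Char.ofNat_toNat, Char.ofNat_toNat] at this

theorem ascListP_filter {α : Type} (n : α → Nat) : ∀ (K : List α),
    ascListP K n = ascListP (K.filter fun k => decide (n k ≠ 0)) n := by
  intro K
  induction K with
  | nil => rfl
  | cons k K ih =>
    simp only [ascListP] at ih ⊢
    by_cases h : n k = 0
    · simp [List.filter_cons, h, ih]
    · simp [List.filter_cons, h, ih]

theorem dict_values_getD {κ ν : Type} [BEq κ] [LawfulBEq κ] (d : PySem.Dict κ ν) (dflt : ν)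
    (h : d.keys.Nodup) : d.values = d.keys.map (fun k => d.getD k dflt) := by
  obtain ⟨l⟩ := d
  exact dict_values_eq_map_keys dflt l (by simpa [PySem.Dict.keys_mk] using h)

theorem main_eq (s : String) (hs : s.toList ≠ []) : sortString3 s = sortString3_alt s := by
  have hdata : s.toList.map (fun ch : Char => (ch.toNat : Int)) ≠ [] := by
    simpa using hs
  -- min and max of the code list exist
  obtain ⟨minv, hmin⟩ : ∃ m, PySem.List.min? (s.toList.map (fun ch : Char => (ch.toNat : Int)))
      (fun x => x) = some m := by
    cases h : PySem.List.min? (s.toList.map (fun ch : Char => (ch.toNat : Int))) (fun x => x) with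
    | none => exact absurd ((PySem.List.min?_eq_none_iff _ _).mp h) hdata
    | some m => exact ⟨m, rfl⟩
  obtain ⟨maxv, hmax⟩ : ∃ m, PySem.List.max? (s.toList.map (fun ch : Char => (ch.toNat : Int)))
      (fun x => x) = some m := by
    cases h : PySem.List.max? (s.toList.map (fun ch : Char => (ch.toNat : Int))) (fun x => x) with
    | none => exact absurd ((PySem.List.max?_eq_none_iff _ _).mp h) hdata
    | some m => exact ⟨m, rfl⟩
  set cs := s.toList with hcs
  set ordI : Char → Int := fun ch => (ch.toNat : Int) with hordI
  set data := cs.map ordI with hdatadef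
  set n : Int → Nat := fun x => data.count x with hn
  set cntC : Char → Nat := fun ch => cs.count ch with hcntC
  set Kchar := PySem.List.sorted (PySem.Set.ofList cs) (fun x => x) false with hKchar
  set Kc := Kchar.map ordI with hKc
  have hlo : ∀ x ∈ data, minv ≤ x := by
    intro x hx; simpa using PySem.List.min?_isMin hmin x hx
  have hhi : ∀ x ∈ data, x ≤ maxv := by
    intro x hx; simpa using PySem.List.max?_isMax hmax x hx
  have hmm : minv ≤ maxv := hlo maxv (PySem.List.max?_mem hmax)
  set Lb := (maxv - minv + 1).toNat with hLb
  -- the maximum count M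
  obtain ⟨M, hM⟩ : ∃ m, PySem.List.max? (PySem.Dict.counter cs).values (fun v => v) = some m := by
    cases h : PySem.List.max? (PySem.Dict.counter cs).values (fun v => v) with
    | none =>
      exfalso
      have hvnil := (PySem.List.max?_eq_none_iff _ _).mp h
      rw [dict_values_getD _ 0 (PySem.Dict.nodup_keys_counter cs)] at hvnil
      have : (PySem.Dict.counter cs).keys = [] := by simpa using hvnil
      rw [PySem.Dict.keys_counter] at this
      cases hcc : cs with
      | nil => exact hs (by simpa [hcs] using hcc)
      | cons a t =>
        have hmem : a ∈ PySem.Set.ofList cs := (PySem.Set.mem_ofList cs a).mpr (by simp [hcc])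
        rw [this] at hmem
        simp at hmem
    | some m => exact ⟨m, rfl⟩
  set MN := M.toNat with hMN
  -- count bounds
  have hcount_le : ∀ ch ∈ cs, (cs.count ch : Int) ≤ M := by
    intro ch hch
    have hmem : ((cs.count ch : Int)) ∈ (PySem.Dict.counter cs).values := by
      rw [dict_values_getD _ 0 (PySem.Dict.nodup_keys_counter cs)]
      apply List.mem_map.mpr
      refine ⟨ch, ?_, ?_⟩
      · rw [PySem.Dict.keys_counter]
        exact (PySem.Set.mem_ofList cs ch).mpr hch
      · exact PySem.Dict.getD_counter cs ch
    simpa using PySem.List.max?_isMax hM _ hmem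
  have hnord : ∀ ch, n (ordI ch) = cntC ch := by
    intro ch
    exact List.count_map_of_injective cs ordI ord_inj ch
  have hKmem : ∀ ch, ch ∈ Kchar ↔ ch ∈ cs := by
    intro ch
    rw [hKchar, PySem.List.mem_sorted, PySem.Set.mem_ofList]
  have hKp : Kchar.Pairwise (· < ·) := PySem.List.sorted_ofList_pairwise_lt cs
  have hKcp : Kc.Pairwise (· < ·) := by
    apply hKp.map
    intro a b hab
    simp only [hordI, Int.ofNat_lt]
    exact_mod_cast Nat.lt_of_succ_le hab
  have hKcmem : ∀ x, x ∈ Kc ↔ x ∈ data := by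
    intro x
    rw [hKc, hdatadef]
    constructor
    · intro hx
      obtain ⟨ch, hch, he⟩ := List.mem_map.mp hx
      exact List.mem_map.mpr ⟨ch, (hKmem ch).mp hch, he⟩
    · intro hx
      obtain ⟨ch, hch, he⟩ := List.mem_map.mp hx
      exact List.mem_map.mpr ⟨ch, (hKmem ch).mpr hch, he⟩
  have hKbound : ∀ k ∈ Kc, 1 ≤ n k ∧ n k ≤ MN := by
    intro k hk
    obtain ⟨ch, hch, he⟩ := List.mem_map.mp hk
    have hchcs : ch ∈ cs := (hKmem ch).mp hch
    have h1 : 1 ≤ cntC ch := by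
      have := List.count_pos_iff.mpr hchcs
      simpa [hcntC] using this
    have h2 := hcount_le ch hchcs
    rw [← he, hnord ch]
    constructor
    · exact h1
    · simp only [hcntC] at *
      omega
  -- the descending canonical list equals (ascListP Kc n).reverse
  have hcanon : (List.range Lb).flatMap
        (fun (j : Nat) => List.replicate (data.countP (fun x => decide (maxv - x = (j:Int)))) (maxv - (j:Int)))
      = (ascListP Kc n).reverse := by
    have hcnt_eq : ∀ j : Nat, data.countP (fun x => decide (maxv - x = (j:Int)))
        = n (maxv - (j:Int)) := by
      intro j
      show data.countP _ = data.count (maxv - (j:Int))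
      rw [List.count_eq_countP]
      apply List.countP_congr
      intro x _
      by_cases h : x = maxv - (j:Int)
      · simp [h]
      · simp [h]
        omega
    have step1 : (List.range Lb).flatMap
          (fun (j : Nat) => List.replicate (data.countP (fun x => decide (maxv - x = (j:Int)))) (maxv - (j:Int)))
        = ascListP ((List.range Lb).map (fun (j : Nat) => maxv - (j:Int))) n := by
      rw [ascListP, List.flatMap_map]
      apply List.flatMap_congr
      intro j _
      rw [hcnt_eq j]
    rw [step1, ascListP_filter n]
    rw [reverse_ascListP]
    congr 1
    -- the filtered descending key list is Kc reversed
    have hrev : (((List.range Lb).map (fun (j : Nat) => maxv - (j:Int))).filter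
        (fun k => decide (n k ≠ 0))).reverse = Kc := by
      apply eq_of_pairwise_lt_of_mem_iff
      · rw [List.pairwise_reverse]
        apply List.Pairwise.filter
        apply List.Pairwise.map _ _ List.pairwise_lt_range
        intro a b hab
        omega
      · exact hKcp
      · intro x
        rw [List.mem_reverse, List.mem_filter, hKcmem x]
        constructor
        · intro ⟨_, hnx⟩
          have hnz : data.count x ≠ 0 := by simpa [hn] using hnx
          exact List.count_pos_iff.mp (Nat.pos_of_ne_zero hnz)
        · intro hx
          refine ⟨?_, ?_⟩
          · apply List.mem_map.mpr
            refine ⟨(maxv - x).toNat, List.mem_range.mpr ?_, ?_⟩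
            · have := hlo x hx
              have := hhi x hx
              omega
            · have := hhi x hx
              omega
          · have h0 := List.count_pos_iff.mpr hx
            simp only [hn, ne_eq, decide_eq_true_eq]
            omega
    have := congrArg List.reverse hrev
    rwa [List.reverse_reverse] at this
  -- A side
  simp only [sortString3]
  rw [sortA, sortFunc3A_desc data minv maxv hmin hmax, ← hLb, hcanon]
  have hA := outerSortA_emit MN Kc n [] true hKcp hKbound
  rw [if_pos rfl] at hA
  rw [hA, List.nil_append]
  rw [emitRounds_map ordI MN Kchar cntC n true (fun ch _ => hnord ch)]
  rw [List.map_map]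
  rw [show ((fun x : Int => Char.ofNat x.toNat) ∘ ordI) = id by
    funext ch
    simp [hordI, Char.ofNat_toNat]]
  rw [List.map_id]
  -- B side
  rw [B_reduce s hs]
  rw [← emitRounds_eq_flat _ _ _ _ (fun ch hch => ((hKbound (ordI ch)
      (List.mem_map.mpr ⟨ch, hch, rfl⟩)).1).trans_eq (hnord ch) |>.trans_eq rfl)]
  rw [hM]
  simp only [Option.getD_some, ← hMN, ← hcs, ← hKchar, ← hcntC]

-- ===== VERDICT (by name: the statement is the Claim_ definition above) =====
theorem sortString3_spec : Claim_equal_sortString3 := by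
  unfold Claim_equal_sortString3
  intro s _ hpre
  unfold Spec_sortString3
  exact main_eq s (fun hl => hpre (String.toList_inj.mp (by simpa using hl)))
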